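-- pv_equiv track=rewrite | github.com/lim4373/study | 프로그래머스/1/82612. 부족한 금액 계산하기/부족한 금액 계산하기.py | solution
-- ===== SOURCE A (Python) =====
-- def solution(price, money, count):
--     sum_1 = 0
--     answer = 0
--     for i in range(1,count+1):
--         sum_1 += i * price
--         if sum_1 < money:
--             answer = 0
--         else:
--             answer =  sum_1 - money
--     return answer
-- ===== SOURCE B (Python) =====
-- def solution(price, money, count):
--     if count < 1:
--         return 0
--     total = price * count * (count + 1) // 2
--     return max(0, total - money)
-- ===== Notes on version B (the rewrite author's own statement) =====
-- stated objective: faster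
-- what changed: Replaces the O(count) loop accumulating the increasing fares with the arithmetic-series closed form price*count*(count+1)//2 and a single max(0, total-money).
import Mathlib
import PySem

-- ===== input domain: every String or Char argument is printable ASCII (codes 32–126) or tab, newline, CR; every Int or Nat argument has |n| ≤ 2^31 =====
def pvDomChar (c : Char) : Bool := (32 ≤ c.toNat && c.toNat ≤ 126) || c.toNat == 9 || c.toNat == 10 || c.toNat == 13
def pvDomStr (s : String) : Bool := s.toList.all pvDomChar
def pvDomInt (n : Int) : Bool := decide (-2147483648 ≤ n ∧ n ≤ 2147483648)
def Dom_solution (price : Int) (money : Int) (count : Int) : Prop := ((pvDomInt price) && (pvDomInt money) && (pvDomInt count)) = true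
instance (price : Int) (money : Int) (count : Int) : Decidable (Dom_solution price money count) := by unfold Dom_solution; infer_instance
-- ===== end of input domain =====

-- B replaces A's O(count) accumulation loop by the arithmetic-series closed form (O(1)).

-- ===== PORT A =====
def solution (price : Int) (money : Int) (count : Int) : Int :=
  -- sum_1 = 0; answer = 0; for i in range(1, count+1): ...
  let st := (PySem.List.pyRange 1 (count + 1) 1).foldl
    (fun (st : Int × Int) i =>
      let sum1 := st.1 + i * price
      (sum1, if sum1 < money then 0 else sum1 - money))
    (0, 0)
  st.2

-- ===== PORT B =====
def solution_alt (price : Int) (money : Int) (count : Int) : Int :=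
  if count < 1 then 0
  else
    let total := PySem.Int.floordiv (price * count * (count + 1)) 2
    max 0 (total - money)

-- ===== PRECONDITION & SPEC =====
def Spec_solution (price : Int) (money : Int) (count : Int) (out : Int) : Prop := out = solution_alt price money count
instance (price : Int) (money : Int) (count : Int) (out : Int) : Decidable (Spec_solution price money count out) := by unfold Spec_solution; infer_instance

-- ===== CLAIM (what is proved, stated in full; the proofs are below) =====
def Claim_equal_solution : Prop := ∀ (price : Int) (money : Int) (count : Int), Dom_solution price money count → Spec_solution price money count (solution price money count)

-- ===== LEMMAS AND PROOFS =====

-- Triangle number as an Int, used only in the proofs.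
def pvTri : Nat → Int
  | 0 => 0
  | n + 1 => pvTri n + (n + 1)

theorem pv_two_tri : ∀ n : Nat, 2 * pvTri n = (n : Int) * ((n : Int) + 1) := by
  intro n
  induction n with
  | zero => simp [pvTri]
  | succ m ih => simp only [pvTri]; push_cast; push_cast at ih; ring_nf; ring_nf at ih; omega

-- Closed form of A's loop on range(1, n+1) for n ≥ 1.
theorem pv_loop_char (price money : Int) (n : Nat) (hn : 1 ≤ n) :
    (PySem.List.pyRange 1 ((n : Int) + 1) 1).foldl
      (fun (st : Int × Int) i =>
        let sum1 := st.1 + i * price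
        (sum1, if sum1 < money then 0 else sum1 - money))
      (0, 0)
    = (price * pvTri n,
       if price * pvTri n < money then 0 else price * pvTri n - money) := by
  induction n with
  | zero => omega
  | succ m ih =>
    rcases Nat.eq_zero_or_pos m with hm | hm
    · subst hm
      rw [show ((0 + 1 : Nat) : Int) + 1 = 1 + 1 by norm_num,
          PySem.List.pyRange_one_singleton]
      norm_num [pvTri]
    · rw [show ((m + 1 : Nat) : Int) + 1 = ((m : Int) + 1) + 1 by norm_num,
          PySem.List.pyRange_one_succ_right (by omega), List.foldl_append, ih hm]
      have hs : price * pvTri m + ((m : Int) + 1) * price = price * pvTri (m + 1) := by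
        simp only [pvTri]; ring
      simp only [List.foldl_cons, List.foldl_nil, hs]

theorem pv_fdiv_tri (price : Int) (n : Nat) :
    PySem.Int.floordiv (price * (n : Int) * ((n : Int) + 1)) 2 = price * pvTri n := by
  show Int.fdiv _ _ = _
  rw [show price * (n : Int) * ((n : Int) + 1) = 2 * (price * pvTri n) by
        rw [mul_assoc, ← pv_two_tri]; ring]
  rw [Int.mul_fdiv_cancel_left _ (by norm_num)]

-- ===== VERDICT (by name: the statement is the Claim_ definition above) =====
theorem solution_spec : Claim_equal_solution := by
  intro price money count _
  unfold Spec_solution solution solution_alt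
  by_cases hc : count < 1
  · rw [PySem.List.pyRange_one_eq_nil (by omega)]
    simp [hc]
  · rw [not_lt] at hc
    obtain ⟨n, hn⟩ : ∃ n : Nat, count = (n : Int) := ⟨count.toNat, by omega⟩
    subst hn
    have hn1 : 1 ≤ n := by exact_mod_cast hc
    rw [pv_loop_char price money n hn1]
    simp only [if_neg (by omega : ¬ ((n : Int) < 1)), pv_fdiv_tri]
    generalize price * pvTri n = x
    split_ifs with h <;> omega
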